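-- pv_equiv track=rewrite | github.com/dowobeha/moses_reloading_experiments | 006/client.py | scoreOrderFromFVals
-- ===== SOURCE A (Python) =====
-- def scoreOrderFromFVals(fvals):
--
--     results=[]
--
--     parts=fvals.strip().split()
--
--     feature=None
--     size=0
--
--     for part in parts:
--         if part.endswith("="):
--             if feature != None:
--                 results.append("{}{}".format(feature,size))
--             feature=part
--             size=0
--
--         else:
--             size += 1
--
--     if feature != None:
--         results.append("{}{}".format(feature,size))
--
--     return results
-- ===== SOURCE B (Python) =====
-- def scoreOrderFromFVals(fvals):
--     out = []
--     count = 0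
--     for part in reversed(fvals.split()):
--         if part.endswith("="):
--             out.append("{}{}".format(part, count))
--             count = 0
--         else:
--             count += 1
--     out.reverse()
--     return out
-- ===== Notes on version B (the rewrite author's own statement) =====
-- stated objective: alternative
-- what changed: B traverses the tokens in reverse with a single running counter of non-marker tokens, building the output back-to-front and reversing it at the end, instead of A's forward streaming pass with a pending-feature sentinel and a post-loop flush.
import Mathlib
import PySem

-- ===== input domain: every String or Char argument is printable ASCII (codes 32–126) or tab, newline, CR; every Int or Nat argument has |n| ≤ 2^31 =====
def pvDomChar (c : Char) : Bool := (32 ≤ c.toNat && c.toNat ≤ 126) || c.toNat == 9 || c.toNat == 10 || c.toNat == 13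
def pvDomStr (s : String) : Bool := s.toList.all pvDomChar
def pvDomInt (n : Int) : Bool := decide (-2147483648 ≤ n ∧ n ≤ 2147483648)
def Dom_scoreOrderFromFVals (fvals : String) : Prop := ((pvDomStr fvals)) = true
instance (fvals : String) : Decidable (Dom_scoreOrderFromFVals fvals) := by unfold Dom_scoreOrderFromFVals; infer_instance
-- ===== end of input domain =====

-- B: reverse traversal with one running counter and output built back-to-front (no pending-feature sentinel, no post-loop flush); alternative decomposition, same cost.

-- ===== PORT A =====
-- loop state: (results, feature, size); one foldl step per token, post-loop flush of the pending feature
def pvAStep (st : List String × Option String × Int) (part : String) :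
    List String × Option String × Int :=
  if PySem.Str.endswith part "=" then
    match st.2.1 with
    | some f => (st.1 ++ [f ++ PySem.Int.toStr st.2.2], some part, (0 : Int))
    | none => (st.1, some part, (0 : Int))
  else (st.1, st.2.1, st.2.2 + 1)

def scoreOrderFromFVals (fvals : String) : List String :=
  let st := (PySem.Str.split₀ (PySem.Str.strip fvals)).foldl pvAStep ([], none, 0)
  match st.2.1 with
  | some f => st.1 ++ [f ++ PySem.Int.toStr st.2.2]
  | none => st.1

-- ===== PORT B =====
-- loop state: (out, count); iterates over the reversed token list, out reversed at the end
def pvBStep (st : List String × Int) (part : String) : List String × Int :=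
  if PySem.Str.endswith part "=" then
    (st.1 ++ [part ++ PySem.Int.toStr st.2], (0 : Int))
  else (st.1, st.2 + 1)

def scoreOrderFromFVals_alt (fvals : String) : List String :=
  ((PySem.Str.split₀ fvals).reverse.foldl pvBStep ([], 0)).1.reverse

-- ===== PRECONDITION & SPEC =====
def Spec_scoreOrderFromFVals (fvals : String) (out : List String) : Prop := out = scoreOrderFromFVals_alt fvals
instance (fvals : String) (out : List String) : Decidable (Spec_scoreOrderFromFVals fvals out) := by unfold Spec_scoreOrderFromFVals; infer_instance

-- ===== CLAIM (what is proved, stated in full; the proofs are below) =====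
def Claim_equal_scoreOrderFromFVals : Prop := ∀ (fvals : String), Dom_scoreOrderFromFVals fvals → Spec_scoreOrderFromFVals fvals (scoreOrderFromFVals fvals)

-- ===== LEMMAS AND PROOFS =====

-- `s.split()` ignores the outer whitespace that `strip` removes.
theorem go_all_space (ws : List Char) (h : ∀ c ∈ ws, PySem.Chars.isspace c = true) :
    ∀ cur acc, PySem.Chars.split₀.go ws cur acc = PySem.Chars.split₀.go [] cur acc := by
  induction ws with
  | nil => intro cur acc; rfl
  | cons c rest ih =>
    intro cur acc
    have hc : PySem.Chars.isspace c = true := h c (List.mem_cons_self ..)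
    have hrest : ∀ x ∈ rest, PySem.Chars.isspace x = true := fun x hx => h x (List.mem_cons_of_mem _ hx)
    simp only [PySem.Chars.split₀.go, hc, if_true]
    by_cases hcur : cur.isEmpty
    · simp [hcur, ih hrest, PySem.Chars.split₀.go]
    · simp [hcur, ih hrest, PySem.Chars.split₀.go]

theorem go_append_space (s ws : List Char) (h : ∀ c ∈ ws, PySem.Chars.isspace c = true) :
    ∀ cur acc, PySem.Chars.split₀.go (s ++ ws) cur acc = PySem.Chars.split₀.go s cur acc := by
  induction s with
  | nil => intro cur acc; simpa using go_all_space ws h cur acc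
  | cons c rest ih =>
    intro cur acc
    simp only [List.cons_append, PySem.Chars.split₀.go]
    split_ifs <;> simp [ih]

theorem go_dropWhile (s : List Char) :
    ∀ acc, PySem.Chars.split₀.go (List.dropWhile PySem.Chars.isspace s) [] acc
      = PySem.Chars.split₀.go s [] acc := by
  induction s with
  | nil => intro acc; rfl
  | cons c rest ih =>
    intro acc
    by_cases hc : PySem.Chars.isspace c = true
    · rw [List.dropWhile_cons_of_pos hc, ih]
      simp [PySem.Chars.split₀.go, hc]
    · rw [List.dropWhile_cons_of_neg (by simp [hc])]

theorem split0_strip (s : List Char) :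
    PySem.Chars.split₀ (PySem.Chars.strip s) = PySem.Chars.split₀ s := by
  unfold PySem.Chars.strip PySem.Chars.rstrip PySem.Chars.lstrip PySem.Chars.split₀
  set u := List.dropWhile PySem.Chars.isspace s with hu
  have hdecomp : u = (List.dropWhile PySem.Chars.isspace u.reverse).reverse
      ++ (List.takeWhile PySem.Chars.isspace u.reverse).reverse := by
    conv_rhs => rw [← List.reverse_append, List.takeWhile_append_dropWhile,
      List.reverse_reverse]
  have hws : ∀ c ∈ (List.takeWhile PySem.Chars.isspace u.reverse).reverse,
      PySem.Chars.isspace c = true := by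
    intro c hc
    exact List.mem_takeWhile_imp (List.mem_reverse.mp hc)
  calc PySem.Chars.split₀.go (List.dropWhile PySem.Chars.isspace u.reverse).reverse [] []
      = PySem.Chars.split₀.go ((List.dropWhile PySem.Chars.isspace u.reverse).reverse
          ++ (List.takeWhile PySem.Chars.isspace u.reverse).reverse) [] [] :=
        (go_append_space _ _ hws [] []).symm
    _ = PySem.Chars.split₀.go u [] [] := by rw [← hdecomp]
    _ = PySem.Chars.split₀.go s [] [] := go_dropWhile s []

theorem split₀_strip_str (s : String) :
    PySem.Str.split₀ (PySem.Str.strip s) = PySem.Str.split₀ s := by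
  unfold PySem.Str.split₀ PySem.Str.strip
  simp [split0_strip]

-- A's final flush, generalised by the count k of non-marker tokens B has already seen to the right
def pvFinish (st : List String × Option String × Int) (k : Int) : List String :=
  match st.2.1 with
  | some f => st.1 ++ [f ++ PySem.Int.toStr (st.2.2 + k)]
  | none => st.1

theorem b_eq_a_state (parts : List String) :
    ∀ (k : Int) (out : List String),
      (parts.reverse.foldl pvBStep (out, k)).1
        = out ++ (pvFinish (parts.foldl pvAStep ([], none, 0)) k).reverse := by
  induction parts using List.reverseRecOn with
  | nil => intro k out; simp [pvFinish]
  | append_singleton ps p ih =>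
    intro k out
    rw [List.reverse_append, List.reverse_singleton, List.singleton_append,
        List.foldl_cons, List.foldl_concat]
    by_cases hp : PySem.Chars.endswith p.toList ['='] = true
    · rw [show pvBStep (out, k) p = (out ++ [p ++ PySem.Int.toStr k], (0 : Int)) by
        simp [pvBStep, hp]]
      rw [ih 0 (out ++ [p ++ PySem.Int.toStr k])]
      rcases hst : ps.foldl pvAStep ([], none, 0) with ⟨res, feat, size⟩
      cases feat with
      | none => simp [pvAStep, pvFinish, hp, zero_add]
      | some f => simp [pvAStep, pvFinish, hp, zero_add, add_zero]
    · rw [show pvBStep (out, k) p = (out, k + 1) by simp [pvBStep, PySem.Str.endswith, hp]]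
      rw [ih (k + 1) out]
      rcases hst : ps.foldl pvAStep ([], none, 0) with ⟨res, feat, size⟩
      cases feat with
      | none => simp [pvAStep, pvFinish, hp]
      | some f =>
        simp [pvAStep, pvFinish, hp]
        ring_nf

-- ===== VERDICT (by name: the statement is the Claim_ definition above) =====
theorem scoreOrderFromFVals_spec : Claim_equal_scoreOrderFromFVals := by
  intro fvals _
  unfold Spec_scoreOrderFromFVals scoreOrderFromFVals scoreOrderFromFVals_alt
  rw [split₀_strip_str]
  rw [b_eq_a_state (PySem.Str.split₀ fvals) 0 []]
  rcases hst : (PySem.Str.split₀ fvals).foldl pvAStep ([], none, 0) with ⟨res, feat, size⟩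
  cases feat with
  | none => simp [pvFinish]
  | some f => simp [pvFinish, add_zero]
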